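-- pv_equiv track=rewrite | github.com/getuliojql/if669 | aula/lista05 - ex001.py | preco
-- ===== SOURCE A (Python) =====
-- def preco(cadeia):
--     minusculas = maiusculas = 0
--
--     for caractere in str(cadeia):
--         if caractere == caractere.lower():
--             minusculas += 1
--
--         else:
--             maiusculas += 1
--
--     if minusculas == maiusculas:
--         return len(cadeia) ** 2
--
--     elif minusculas > maiusculas:
--         return fatorial(minusculas) * len(cadeia)
--
--     else:
--         return fatorial(maiusculas) * len(cadeia)
--
-- def fatorial(numero):
--     if numero == 0:
--         return 1
--
--     else:
--         return numero * fatorial(numero - 1)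
-- ===== SOURCE B (Python) =====
-- def preco(cadeia):
--     s = str(cadeia)
--     minusculas = sum(1 for c in s if c == c.lower())
--     maiusculas = len(s) - minusculas
--     if minusculas == maiusculas:
--         return len(cadeia) ** 2
--     n = max(minusculas, maiusculas)
--     result = 1
--     for i in range(2, n + 1):
--         result *= i
--     return result * len(cadeia)
-- ===== Notes on version B (the rewrite author's own statement) =====
-- stated objective: alternative
-- what changed: B counts only lowercase-like characters once and derives the uppercase count from the length, folds the two result branches into one via max, and replaces the recursive fatorial with an iterative product over range(2, n+1).
import Mathlib
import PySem

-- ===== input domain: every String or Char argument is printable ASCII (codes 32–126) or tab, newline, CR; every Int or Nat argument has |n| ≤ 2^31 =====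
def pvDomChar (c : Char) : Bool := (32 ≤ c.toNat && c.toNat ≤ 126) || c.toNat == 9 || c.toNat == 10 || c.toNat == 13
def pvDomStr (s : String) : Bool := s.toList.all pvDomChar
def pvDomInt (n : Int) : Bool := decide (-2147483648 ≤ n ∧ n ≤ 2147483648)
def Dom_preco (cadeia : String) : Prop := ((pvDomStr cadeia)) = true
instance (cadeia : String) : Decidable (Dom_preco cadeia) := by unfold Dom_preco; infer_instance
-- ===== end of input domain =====

-- B replaces the recursive factorial with an iterative product and derives the uppercase
-- count from the length instead of a second counter (objective: alternative decomposition).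

-- ===== PORT A =====
-- Python's fatorial diverges on negative input; it is only ever called on nonnegative
-- counts, where the ≤ 0 guard (needed for termination) coincides with Python's == 0.
def fatorialA (numero : Int) : Int :=
  if numero ≤ 0 then 1 else numero * fatorialA (numero - 1)
termination_by numero.toNat
decreasing_by omega

def preco (cadeia : String) : Int :=
  -- minusculas = maiusculas = 0; for caractere in str(cadeia): …
  let counts : Int × Int :=
    cadeia.toList.foldl
      (fun (p : Int × Int) c =>
        if c = PySem.Chars.lowerChar c then (p.1 + 1, p.2) else (p.1, p.2 + 1))
      (0, 0)
  let minusculas := counts.1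
  let maiusculas := counts.2
  if minusculas = maiusculas then (PySem.Str.len cadeia) ^ 2
  else if minusculas > maiusculas then fatorialA minusculas * PySem.Str.len cadeia
  else fatorialA maiusculas * PySem.Str.len cadeia

-- ===== PORT B =====
def preco_alt (cadeia : String) : Int :=
  let minusculas : Int := (cadeia.toList.countP (fun c => c = PySem.Chars.lowerChar c) : Nat)
  let maiusculas : Int := PySem.Str.len cadeia - minusculas
  if minusculas = maiusculas then (PySem.Str.len cadeia) ^ 2
  else
    let n := max minusculas maiusculas
    let result := (PySem.List.pyRange 2 (n + 1) 1).foldl (fun r i => r * i) 1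
    result * PySem.Str.len cadeia

-- ===== PRECONDITION & SPEC =====
def Spec_preco (cadeia : String) (out : Int) : Prop := out = preco_alt cadeia
instance (cadeia : String) (out : Int) : Decidable (Spec_preco cadeia out) := by unfold Spec_preco; infer_instance

-- ===== CLAIM (what is proved, stated in full; the proofs are below) =====
def Claim_equal_preco : Prop := ∀ (cadeia : String), Dom_preco cadeia → Spec_preco cadeia (preco cadeia)

-- ===== LEMMAS AND PROOFS =====

/-- A's two-counter fold equals (countP, length - countP). -/
theorem counts_eq (l : List Char) (a b : Int) :
    l.foldl
      (fun (p : Int × Int) c =>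
        if c = PySem.Chars.lowerChar c then (p.1 + 1, p.2) else (p.1, p.2 + 1))
      (a, b)
    = (a + (l.countP (fun c => c = PySem.Chars.lowerChar c) : Nat),
       b + ((l.length : Int) - (l.countP (fun c => c = PySem.Chars.lowerChar c) : Nat))) := by
  induction l generalizing a b with
  | nil => simp
  | cons c t ih =>
    by_cases h : c = PySem.Chars.lowerChar c
    · have hd : decide (c = PySem.Chars.lowerChar c) = true := decide_eq_true h
      simp only [List.foldl_cons, if_pos h, ih, List.countP_cons, List.length_cons, hd,
        if_true, Prod.mk.injEq]
      constructor <;> push_cast <;> ring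
    · have hd : decide (c = PySem.Chars.lowerChar c) = false := decide_eq_false h
      simp only [List.foldl_cons, if_neg h, ih, List.countP_cons, List.length_cons, hd,
        Bool.false_eq_true, if_false, Prod.mk.injEq]
      constructor <;> push_cast <;> ring

/-- The iterative product over range(2, n+1) equals the recursive factorial. -/
theorem prod_range_eq_fatorial (k : Nat) :
    (PySem.List.pyRange 2 ((k : Int) + 1) 1).foldl (fun r i => r * i) 1 = fatorialA k := by
  induction k with
  | zero =>
    have h0 : PySem.List.pyRange 2 ((0:Int) + 1) 1 = [] := by decide
    simp only [Nat.cast_zero]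
    rw [h0, fatorialA]
    norm_num
  | succ m ih =>
    rcases Nat.eq_zero_or_pos m with hm | hm
    · subst hm
      have h1 : PySem.List.pyRange 2 (((1:Nat):Int) + 1) 1 = [] := by decide
      rw [h1, fatorialA, fatorialA]
      norm_num
    · have hle : (2:Int) ≤ (m:Int) + 1 := by exact_mod_cast by omega
      have hstep : PySem.List.pyRange 2 (((m + 1 : Nat) : Int) + 1) 1
          = PySem.List.pyRange 2 ((m:Int) + 1) 1 ++ [(m:Int) + 1] := by
        have := PySem.List.pyRange_one_succ_right (a := 2) (b := (m:Int) + 1) hle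
        rw [show (((m + 1 : Nat) : Int) + 1) = ((m:Int) + 1) + 1 by push_cast; ring, this]
      rw [hstep, List.foldl_append, ih]
      simp only [List.foldl]
      have hpos : ¬ (((m + 1 : Nat) : Int) ≤ 0) := by push_cast; omega
      have hRHS : fatorialA ((m + 1 : Nat) : Int)
          = ((m:Int) + 1) * fatorialA ((m:Int)) := by
        rw [fatorialA, if_neg hpos]
        push_cast
        norm_num
      rw [hRHS]
      ring

-- ===== VERDICT (by name: the statement is the Claim_ definition above) =====
theorem preco_spec : Claim_equal_preco := by
  intro cadeia _
  unfold Spec_preco preco preco_alt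
  simp only [counts_eq, PySem.Str.len]
  set L : Int := (cadeia.toList.length : Int) with hL
  set m : Int := ((cadeia.toList.countP (fun c => c = PySem.Chars.lowerChar c) : Nat) : Int) with hm
  have hm0 : 0 ≤ m := by positivity
  have hmL : m ≤ L := by
    have := List.countP_le_length (p := fun c => decide (c = PySem.Chars.lowerChar c)) (l := cadeia.toList)
    omega
  simp only [zero_add]
  by_cases heq : m = L - m
  · rw [if_pos heq, if_pos heq]
  · rw [if_neg heq, if_neg heq]
    by_cases hgt : m > L - m
    · rw [if_pos hgt]
      have hmax : max m (L - m) = m := max_eq_left (le_of_lt hgt)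
      obtain ⟨k, hk⟩ := Int.eq_ofNat_of_zero_le hm0
      rw [hmax, hk, prod_range_eq_fatorial k]
    · rw [if_neg hgt]
      have hmax : max m (L - m) = L - m := max_eq_right (by omega)
      obtain ⟨k, hk⟩ := Int.eq_ofNat_of_zero_le (show (0:Int) ≤ L - m by omega)
      rw [hmax, hk, prod_range_eq_fatorial k]
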